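-- pv_equiv track=rewrite | github.com/BeardedPlatypus/advent-of-code-2022 | python/advent/challenges/day_03.py | _pre_process_part2
-- ===== SOURCE A (Python) =====
-- from typing import Iterable, Set, Sequence, Tuple
--
-- ElementPart2 = Tuple[Set[str], Set[str]]
--
-- def _pre_process_part2(lines: Iterable[str]) -> Iterable[ElementPart2]:
--     i = 0
--     acc = ()
--     for l in lines:
--         i += 1
--         acc += (set(l),)
--
--         if i == 3:
--             yield acc
--             acc = ()
--             i = 0
-- ===== SOURCE B (Python) =====
-- def _pre_process_part2(lines):
--     it = iter(lines)
--     for group in zip(it, it, it):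
--         yield tuple(set(l) for l in group)
-- ===== Notes on version B (the rewrite author's own statement) =====
-- stated objective: idiomatic
-- what changed: Replaced the manual counter + tuple-concatenation accumulator with the iterator-aliasing zip(it, it, it) chunking idiom, which consumes three lines at a time and drops the partial tail naturally.
import Mathlib
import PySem

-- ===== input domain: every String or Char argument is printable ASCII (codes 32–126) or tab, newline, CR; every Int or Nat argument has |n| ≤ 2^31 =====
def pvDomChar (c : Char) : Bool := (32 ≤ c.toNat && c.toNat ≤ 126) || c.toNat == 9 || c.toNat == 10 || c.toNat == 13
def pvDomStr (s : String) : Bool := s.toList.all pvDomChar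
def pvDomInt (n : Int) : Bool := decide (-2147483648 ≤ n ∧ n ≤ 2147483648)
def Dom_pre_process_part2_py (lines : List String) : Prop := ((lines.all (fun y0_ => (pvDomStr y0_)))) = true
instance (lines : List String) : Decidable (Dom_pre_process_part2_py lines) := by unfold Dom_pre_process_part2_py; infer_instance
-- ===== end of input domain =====

-- B replaces A's counter/accumulator loop with the zip(it,it,it) iterator-chunking idiom (same values; idiomatic, no speed claim).


-- ===== PORT A =====
-- Port A: the counter/accumulator generator, as structural recursion over the same state (i, acc).
-- set(l) over a Python str yields its characters as 1-char strings.
def pvSetOfLine (l : String) : List String :=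
  PySem.Set.ofList (l.toList.map (fun c => String.ofList [c]))

def pvLoopA (i : Int) (acc : List (List String)) : List String → List (List (List String))
  | [] => []
  | l :: rest =>
      let i' := i + 1
      let acc' := acc ++ [pvSetOfLine l]
      if i' == 3 then acc' :: pvLoopA 0 [] rest else pvLoopA i' acc' rest

def pre_process_part2_py (lines : List String) : List (List (List String)) :=
  pvLoopA 0 [] lines

-- ===== PORT B =====
-- Port B: zip(it, it, it) chunking — consume three lines at a time, drop the partial tail.
def pre_process_part2_py_alt : List String → List (List (List String))
  | a :: b :: c :: rest =>
      [pvSetOfLine a, pvSetOfLine b, pvSetOfLine c] :: pre_process_part2_py_alt rest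
  | _ => []

-- ===== PRECONDITION & SPEC =====
def Spec_pre_process_part2_py (lines : List String) (out : List (List (List String))) : Prop := out = pre_process_part2_py_alt lines
instance (lines : List String) (out : List (List (List String))) : Decidable (Spec_pre_process_part2_py lines out) := by unfold Spec_pre_process_part2_py; infer_instance

-- ===== CLAIM (what is proved, stated in full; the proofs are below) =====
def Claim_equal_pre_process_part2_py : Prop := ∀ (lines : List String), Dom_pre_process_part2_py lines → Spec_pre_process_part2_py lines (pre_process_part2_py lines)

-- ===== LEMMAS AND PROOFS =====

-- ===== VERDICT (by name: the statement is the Claim_ definition above) =====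
lemma pvLoopA_chunk (a b c : String) (rest : List String) :
    pvLoopA 0 [] (a :: b :: c :: rest)
      = [pvSetOfLine a, pvSetOfLine b, pvSetOfLine c] :: pvLoopA 0 [] rest := by
  simp [pvLoopA]

lemma pvLoopA_eq_alt (lines : List String) :
    pvLoopA 0 [] lines = pre_process_part2_py_alt lines := by
  induction lines using pre_process_part2_py_alt.induct with
  | case1 a b c rest ih => rw [pvLoopA_chunk, ih, pre_process_part2_py_alt]
  | case2 ls h =>
      match ls with
      | [] => rfl
      | [l] => simp [pvLoopA, pre_process_part2_py_alt]
      | [l1, l2] => simp [pvLoopA, pre_process_part2_py_alt]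
      | a :: b :: c :: rest => exact absurd rfl (h a b c rest)

theorem pre_process_part2_py_spec : Claim_equal_pre_process_part2_py := by
  intro lines _
  unfold Spec_pre_process_part2_py pre_process_part2_py
  exact pvLoopA_eq_alt lines
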